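-- pv_equiv track=rewrite | github.com/pooneh-nb/cookieGuard | cookieInterceptor/analyze/create_regular_storage_logs_3.py | is_sneaky_exfiltration
-- ===== SOURCE A (Python) =====
-- def is_sneaky_exfiltration(query_ids, hashes):
--     sneaky_exfiltration = []
--     for qid in query_ids:
--         for key, algo in hashes:
--             for algo_name, algo_value in algo.items():
--                 if qid == algo_value:
--                     sneaky_exfiltration.append((key, algo_name))
--     return sneaky_exfiltration
-- ===== SOURCE B (Python) =====
-- def is_sneaky_exfiltration(query_ids, hashes):
--     # Flatten once, group entries by algo value, then one lookup per query id.
--     pairs = [(algo_value, (key, algo_name))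
--              for key, algo in hashes
--              for algo_name, algo_value in algo.items()]
--     index = {}
--     for value, entry in pairs:
--         index.setdefault(value, []).append(entry)
--     return [entry for qid in query_ids for entry in index.get(qid, [])]
-- ===== Notes on version B (the rewrite author's own statement) =====
-- stated objective: faster
-- what changed: Builds a hash index from algo value to the ordered list of (key, algo_name) entries once, then answers each query id by a single dictionary lookup, instead of rescanning all hashes and their algo items for every query id.
import Mathlib
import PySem

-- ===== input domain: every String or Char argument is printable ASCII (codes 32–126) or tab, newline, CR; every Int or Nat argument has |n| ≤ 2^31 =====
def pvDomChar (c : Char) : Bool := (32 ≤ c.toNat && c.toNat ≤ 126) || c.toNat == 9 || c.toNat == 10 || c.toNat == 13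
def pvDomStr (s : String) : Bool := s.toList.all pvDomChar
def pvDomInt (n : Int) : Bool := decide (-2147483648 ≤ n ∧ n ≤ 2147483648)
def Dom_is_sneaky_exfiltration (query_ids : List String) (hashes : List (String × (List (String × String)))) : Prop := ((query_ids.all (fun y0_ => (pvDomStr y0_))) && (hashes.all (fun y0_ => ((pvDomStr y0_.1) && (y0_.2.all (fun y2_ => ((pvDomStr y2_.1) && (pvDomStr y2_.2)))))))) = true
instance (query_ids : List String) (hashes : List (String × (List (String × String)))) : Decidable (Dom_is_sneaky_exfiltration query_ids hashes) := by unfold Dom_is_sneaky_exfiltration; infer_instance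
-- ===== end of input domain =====

-- B replaces A's triple nested rescan with a one-pass hash index (algo value -> ordered entries) and one lookup per query id: measurably faster.
-- ===== PORT A =====
def is_sneaky_exfiltration (query_ids : List String) (hashes : List (String × (List (String × String)))) : List (String × String) :=
  query_ids.foldl (fun acc qid =>
    hashes.foldl (fun acc kh =>
      kh.2.foldl (fun acc p =>
        if qid == p.2 then acc ++ [(kh.1, p.1)] else acc) acc) acc) []

-- ===== PORT B =====
def is_sneaky_exfiltration_alt (query_ids : List String) (hashes : List (String × (List (String × String)))) : List (String × String) :=
  let pairs := hashes.flatMap (fun kh => kh.2.map (fun p => (p.2, (kh.1, p.1))))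
  let index := pairs.foldl (fun d pr => d.modify pr.1 [] (· ++ [pr.2])) PySem.Dict.empty
  query_ids.foldl (fun acc qid => acc ++ index.getD qid []) []

-- ===== PRECONDITION & SPEC =====
def Spec_is_sneaky_exfiltration (query_ids : List String) (hashes : List (String × (List (String × String)))) (out : List (String × String)) : Prop := out = is_sneaky_exfiltration_alt query_ids hashes
instance (query_ids : List String) (hashes : List (String × (List (String × String)))) (out : List (String × String)) : Decidable (Spec_is_sneaky_exfiltration query_ids hashes out) := by unfold Spec_is_sneaky_exfiltration; infer_instance

-- ===== CLAIM (what is proved, stated in full; the proofs are below) =====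
def Claim_equal_is_sneaky_exfiltration : Prop := ∀ (query_ids : List String) (hashes : List (String × (List (String × String)))), Dom_is_sneaky_exfiltration query_ids hashes → Spec_is_sneaky_exfiltration query_ids hashes (is_sneaky_exfiltration query_ids hashes)

-- ===== LEMMAS AND PROOFS =====

-- ===== VERDICT (by name: the statement is the Claim_ definition above) =====
-- inner two loops of A, for one query id q, collect exactly the matching flattened entries
theorem A_inner2 (q key : String) (l : List (String × String)) (acc : List (String × String)) :
    l.foldl (fun acc p => if q == p.2 then acc ++ [(key, p.1)] else acc) acc
      = acc ++ ((l.map (fun p => (p.2, (key, p.1)))).filter (fun pr => pr.1 == q)).map (·.2) := by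
  induction l generalizing acc with
  | nil => simp
  | cons p tl ih =>
    simp only [List.foldl_cons, List.map_cons, List.filter_cons, ih]
    by_cases h : q = p.2
    · simp [h]
    · have h' : ¬ p.2 = q := fun e => h e.symm
      simp [h, h']

theorem A_inner (q : String) (hs : List (String × (List (String × String)))) (acc : List (String × String)) :
    hs.foldl (fun acc kh =>
        kh.2.foldl (fun acc p => if q == p.2 then acc ++ [(kh.1, p.1)] else acc) acc) acc
      = acc ++ ((hs.flatMap (fun kh => kh.2.map (fun p => (p.2, (kh.1, p.1))))).filter
          (fun pr => pr.1 == q)).map (·.2) := by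
  induction hs generalizing acc with
  | nil => simp
  | cons kh tl ih =>
    rw [List.foldl_cons, A_inner2, ih]
    simp [List.flatMap_cons, List.filter_append]

theorem is_sneaky_exfiltration_spec : Claim_equal_is_sneaky_exfiltration := by
  intro query_ids hashes _
  unfold Spec_is_sneaky_exfiltration is_sneaky_exfiltration is_sneaky_exfiltration_alt
  simp only []
  congr 1
  funext acc qid
  rw [A_inner, PySem.Dict.getD_foldl_modify_append, PySem.Dict.getD_empty]
  simp
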